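-- pv_equiv track=rewrite | github.com/robertguss/canvas-programmatic-api-docs | parse_canvas_markdown.py | _extract_endpoint_description
-- ===== SOURCE A (Python) =====
-- def _extract_endpoint_description(content: str) -> str:
--     lines = content.split('\n')
--     description_lines = []
--
--     for line in lines:
--         line = line.strip()
--         if not line:
--             continue
--         if line.startswith('**Scope:**'):
--             continue
--         if line.startswith('**Request Parameters:**'):
--             break
--         if line.startswith('**') or line.startswith('|'):
--             break
--         description_lines.append(line)
--
--     return ' '.join(description_lines).strip()
-- ===== SOURCE B (Python) =====
-- def _extract_endpoint_description(content: str) -> str: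
--     stripped = [line.strip() for line in content.split('\n')]
--
--     def skip(line):
--         return not line or line.startswith('**Scope:**')
--
--     boundary = next(
--         (i for i, line in enumerate(stripped)
--          if not skip(line) and (line.startswith('**') or line.startswith('|'))),
--         len(stripped))
--     return ' '.join(line for line in stripped[:boundary] if not skip(line)).strip()
-- ===== Notes on version B (the rewrite author's own statement) =====
-- stated objective: alternative
-- what changed: Replaces the single break/continue accumulator loop by a two-pass decomposition: strip all lines once, locate the boundary index with next(...) over enumerate, then filter-and-join the prefix before that index.
import Mathlib
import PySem

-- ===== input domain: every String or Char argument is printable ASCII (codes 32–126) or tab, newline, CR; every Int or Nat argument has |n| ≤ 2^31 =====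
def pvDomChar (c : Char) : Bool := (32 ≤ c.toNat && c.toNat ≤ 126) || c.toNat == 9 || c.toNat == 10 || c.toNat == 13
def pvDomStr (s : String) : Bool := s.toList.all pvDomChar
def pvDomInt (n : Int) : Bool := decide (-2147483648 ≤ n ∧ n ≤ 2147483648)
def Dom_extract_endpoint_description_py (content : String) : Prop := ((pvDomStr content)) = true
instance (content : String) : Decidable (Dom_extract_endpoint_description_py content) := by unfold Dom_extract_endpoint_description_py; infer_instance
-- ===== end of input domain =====

-- B is an alternative decomposition (strip all, locate boundary, filter-and-join the prefix); return value equivalence, A mutates nothing.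

-- ===== PORT A =====
-- the for-loop with continue/break, state = description_lines accumulator
def pvALoop : List String → List String → List String
  | [], acc => acc
  | l :: ls, acc =>
    let line := PySem.Str.strip l
    if line = "" then pvALoop ls acc
    else if PySem.Str.startswith line "**Scope:**" then pvALoop ls acc
    else if PySem.Str.startswith line "**Request Parameters:**" then acc
    else if PySem.Str.startswith line "**" || PySem.Str.startswith line "|" then acc
    else pvALoop ls (acc ++ [line])

def extract_endpoint_description_py (content : String) : String :=
  PySem.Str.strip (PySem.Str.join " " (pvALoop ((PySem.Str.split? content "\n").getD []) []))

-- ===== PORT B =====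
def pvSkip (line : String) : Bool :=
  line == "" || PySem.Str.startswith line "**Scope:**"

def pvBoundary (line : String) : Bool :=
  !pvSkip line && (PySem.Str.startswith line "**" || PySem.Str.startswith line "|")

def extract_endpoint_description_py_alt (content : String) : String :=
  let stripped := ((PySem.Str.split? content "\n").getD []).map PySem.Str.strip
  let boundary := stripped.findIdx pvBoundary            -- next(..., len(stripped))
  PySem.Str.strip (PySem.Str.join " " ((stripped.take boundary).filter (fun l => !pvSkip l)))

-- ===== PRECONDITION & SPEC =====
def Spec_extract_endpoint_description_py (content : String) (out : String) : Prop := out = extract_endpoint_description_py_alt content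
instance (content : String) (out : String) : Decidable (Spec_extract_endpoint_description_py content out) := by unfold Spec_extract_endpoint_description_py; infer_instance

-- ===== CLAIM (what is proved, stated in full; the proofs are below) =====
def Claim_equal_extract_endpoint_description_py : Prop := ∀ (content : String), Dom_extract_endpoint_description_py content → Spec_extract_endpoint_description_py content (extract_endpoint_description_py content)

-- ===== LEMMAS AND PROOFS =====

-- '**Request Parameters:**' starts with '**', so A's two break branches are B's one boundary test
theorem pv_rp_imp_star {line : String}
    (h : PySem.Str.startswith line "**Request Parameters:**" = true) :
    PySem.Str.startswith line "**" = true := by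
  simp only [PySem.Str.startswith_eq, PySem.Chars.startswith_iff] at h ⊢
  exact List.IsPrefix.trans (by decide) h

theorem pvALoop_eq (ls : List String) (acc : List String) :
    pvALoop ls acc =
      acc ++ (((ls.map PySem.Str.strip).take ((ls.map PySem.Str.strip).findIdx pvBoundary)).filter
        (fun l => !pvSkip l)) := by
  induction ls generalizing acc with
  | nil => simp [pvALoop]
  | cons l ls ih =>
    simp only [List.map_cons, List.findIdx_cons]
    by_cases hsk : pvSkip (PySem.Str.strip l) = true
    · have hb : pvBoundary (PySem.Str.strip l) = false := by
        simp only [pvBoundary, hsk, Bool.not_true, Bool.false_and]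
      rw [hb]
      simp only [cond_false, List.take_succ_cons, List.filter_cons, Bool.not_eq_eq_eq_not,
        Bool.not_true]
      rw [if_neg (by simp [hsk] : ¬ pvSkip (PySem.Str.strip l) = false)]
      simp only [pvSkip, Bool.or_eq_true, beq_iff_eq] at hsk
      rcases hsk with h1 | h2
      · rw [pvALoop]
        rw [if_pos h1]
        exact ih acc
      · rw [pvALoop]
        by_cases he : PySem.Str.strip l = ""
        · rw [if_pos he]; exact ih acc
        · rw [if_neg he, if_pos h2]; exact ih acc
    · have hsk' : pvSkip (PySem.Str.strip l) = false := Bool.not_eq_true _ ▸ (by simpa using hsk)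
      have hparts := hsk'
      simp only [pvSkip, Bool.or_eq_false_iff, beq_eq_false_iff_ne, ne_eq] at hparts
      obtain ⟨hne, hnsc⟩ := hparts
      by_cases hbd : pvBoundary (PySem.Str.strip l) = true
      · -- break: A returns acc via one of its two break branches
        rw [hbd]
        simp only [cond_true, List.take_zero, List.filter_nil, List.append_nil]
        have hmk : (PySem.Str.startswith (PySem.Str.strip l) "**" ||
            PySem.Str.startswith (PySem.Str.strip l) "|") = true := by
          simpa only [pvBoundary, hsk', Bool.not_false, Bool.true_and] using hbd
        rw [pvALoop]
        rw [if_neg hne, if_neg (by simp only [hnsc]; exact Bool.false_ne_true)]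
        by_cases hrp : PySem.Str.startswith (PySem.Str.strip l) "**Request Parameters:**" = true
        · rw [if_pos hrp]
        · rw [if_neg hrp, if_pos hmk]
      · -- plain description line: appended
        have hbd' : pvBoundary (PySem.Str.strip l) = false := by simpa using hbd
        have hmk : (PySem.Str.startswith (PySem.Str.strip l) "**" ||
            PySem.Str.startswith (PySem.Str.strip l) "|") = false := by
          simpa only [pvBoundary, hsk', Bool.not_false, Bool.true_and] using hbd'
        obtain ⟨hm1, hm2⟩ := Bool.or_eq_false_iff.mp hmk
        have hrp : PySem.Str.startswith (PySem.Str.strip l) "**Request Parameters:**" = false := by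
          by_contra h
          have h' : PySem.Str.startswith (PySem.Str.strip l) "**Request Parameters:**" = true := by
            simpa using h
          rw [pv_rp_imp_star h'] at hm1
          exact Bool.false_ne_true hm1.symm
        rw [hbd']
        simp only [cond_false, List.take_succ_cons, List.filter_cons]
        rw [if_pos (show (!pvSkip (PySem.Str.strip l)) = true by rw [hsk']; rfl)]
        rw [pvALoop]
        rw [if_neg hne, if_neg (by simp only [hnsc]; exact Bool.false_ne_true),
          if_neg (by simp only [hrp]; exact Bool.false_ne_true),
          if_neg (by simp only [hmk]; exact Bool.false_ne_true)]
        rw [ih (acc ++ [PySem.Str.strip l])]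
        simp

-- ===== VERDICT (by name: the statement is the Claim_ definition above) =====
theorem extract_endpoint_description_py_spec : Claim_equal_extract_endpoint_description_py := by
  intro content _
  unfold Spec_extract_endpoint_description_py
  unfold extract_endpoint_description_py extract_endpoint_description_py_alt
  rw [pvALoop_eq]
  simp only [List.nil_append]
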